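-- pv_equiv track=rewrite | github.com/amosr2002/Data-Science-REU | DynamicStackNet.py | top_half
-- ===== SOURCE A (Python) =====
-- import math
--
-- def top_half(errors):
--     """Returns upper half of accurate models
--     Args:
--         model_acc (dictionary)
--     """
--     xc = errors.copy()
--     for x in xc:
--       num = xc[x][-1]
--       xc[x] = num
--     sort_errors = dict(sorted(xc.items(), key=lambda x: x[1], reverse=True))
--     #errors = sort_errors
--     tophalf = list(sort_errors.keys())[:math.floor(len(sort_errors.keys())/2)]
--
--     wins = {key: None for key in tophalf}
--
--     return(tophalf, wins)
--
--     pass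
-- ===== SOURCE B (Python) =====
-- import heapq
--
-- def top_half(errors):
--     """Returns upper half of accurate models (top floor(n/2) keys by last error)."""
--     pairs = [(key, vals[-1]) for key, vals in errors.items()]
--     k = len(pairs) // 2
--     top = heapq.nlargest(k, pairs, key=lambda kv: kv[1])
--     tophalf = [key for key, _ in top]
--     wins = dict.fromkeys(tophalf)
--     return (tophalf, wins)
-- ===== Notes on version B (the rewrite author's own statement) =====
-- stated objective: idiomatic
-- what changed: Instead of rewriting a copied dict in place, sorting all items and rebuilding a dict just to slice its keys, B builds the (key, last-error) pairs in one comprehension and selects the top floor(n/2) directly with heapq.nlargest (documented to equal the stable reverse sort's prefix), then dict.fromkeys for wins.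
-- outside the precondition, e.g. on top_half({'a': []}): A raises IndexError, B raises IndexError
import Mathlib
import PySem

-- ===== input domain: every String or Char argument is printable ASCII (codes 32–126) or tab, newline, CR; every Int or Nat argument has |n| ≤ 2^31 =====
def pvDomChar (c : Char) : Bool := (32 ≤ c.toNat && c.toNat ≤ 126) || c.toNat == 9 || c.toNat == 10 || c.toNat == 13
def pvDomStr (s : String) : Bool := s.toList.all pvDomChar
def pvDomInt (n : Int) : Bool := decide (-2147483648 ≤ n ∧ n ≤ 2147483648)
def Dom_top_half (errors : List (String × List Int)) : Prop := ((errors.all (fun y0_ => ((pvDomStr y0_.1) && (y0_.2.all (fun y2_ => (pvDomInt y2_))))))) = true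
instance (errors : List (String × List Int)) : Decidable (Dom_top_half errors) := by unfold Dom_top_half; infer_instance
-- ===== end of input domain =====

-- B replaces A's dict-copy-and-mutate + full reverse sort + dict rebuild by one pass building
-- (key, last-error) pairs and heapq.nlargest selection of the top floor(n/2); return value only.

-- ===== PORT A =====
def top_half (errors : List (String × List Int)) : List String × (List (String × Option Int)) :=
  -- xc = errors.copy()
  let xc : PySem.Dict String (List Int) := PySem.Dict.mk errors
  -- for x in xc: num = xc[x][-1]; xc[x] = num   (value type changes to int: built as a fresh dict)
  -- xc[x][-1] raises IndexError on an empty list; Pre_ excludes that, the .getD 0 is unreachable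
  let xc2 : PySem.Dict String Int :=
    (PySem.Dict.keys xc).foldl
      (fun acc x => acc.insert x ((PySem.List.pyGet? (xc.getD x []) (-1)).getD 0))
      PySem.Dict.empty
  -- sort_errors = dict(sorted(xc.items(), key=lambda x: x[1], reverse=True))
  let sort_errors : PySem.Dict String Int :=
    (PySem.List.sorted (PySem.Dict.items xc2) (fun p => p.2) true).foldl
      (fun d p => d.insert p.1 p.2) PySem.Dict.empty
  -- tophalf = list(sort_errors.keys())[:math.floor(len(sort_errors.keys())/2)]
  -- math.floor(len/2) on a Nat length is Nat division; the nonnegative slice [:k] is take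
  let tophalf := (PySem.Dict.keys sort_errors).take ((PySem.Dict.keys sort_errors).length / 2)
  -- wins = {key: None for key in tophalf}
  let wins : PySem.Dict String (Option Int) :=
    tophalf.foldl (fun d k => d.insert k none) PySem.Dict.empty
  (tophalf, PySem.Dict.items wins)

-- ===== PORT B =====
def top_half_alt (errors : List (String × List Int)) : List String × (List (String × Option Int)) :=
  -- pairs = [(key, vals[-1]) for key, vals in errors.items()]   (Pre_ excludes empty vals)
  let pairs := errors.map (fun kv => (kv.1, (PySem.List.pyGet? kv.2 (-1)).getD 0))
  -- k = len(pairs) // 2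
  let k := pairs.length / 2
  -- heapq.nlargest(k, pairs, key=...) ported by its documented contract: sorted(..., reverse=True)[:k]
  let top := (PySem.List.sorted pairs (fun p => p.2) true).take k
  let tophalf := top.map (fun p => p.1)
  -- wins = dict.fromkeys(tophalf)
  let wins := (PySem.List.dedup tophalf).map (fun s => (s, (none : Option Int)))
  (tophalf, wins)

-- ===== PRECONDITION & SPEC =====
-- Pre_ excludes inputs with an empty error list (A raises IndexError on errors[x][-1]) and
-- assoc lists with duplicate keys, which do not represent a Python dict argument at all.
def Pre_top_half (errors : List (String × List Int)) : Prop :=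
  (errors.map (fun p => p.1)).Nodup ∧ ∀ p ∈ errors, p.2 ≠ []
instance (errors : List (String × List Int)) : Decidable (Pre_top_half errors) := by
  unfold Pre_top_half; infer_instance

def pvWitness_top_half : (List (String × List Int)) :=
  [("a", [3, 1]), ("b", [2]), ("c", [7]), ("d", [0, 5])]

def Spec_top_half (errors : List (String × List Int)) (out : List String × (List (String × Option Int))) : Prop := out = top_half_alt errors
instance (errors : List (String × List Int)) (out : List String × (List (String × Option Int))) : Decidable (Spec_top_half errors out) := by unfold Spec_top_half; infer_instance

-- ===== CLAIM (what is proved, stated in full; the proofs are below) =====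
def Claim_equal_top_half : Prop := ∀ (errors : List (String × List Int)), Dom_top_half errors → Pre_top_half errors → Spec_top_half errors (top_half errors)

-- ===== LEMMAS AND PROOFS =====

theorem top_half_main (l : List (String × List Int)) (h : Pre_top_half l) :
    top_half l = top_half_alt l := by
  obtain ⟨hnd, _⟩ := h
  unfold top_half top_half_alt
  -- the (key, last-error) pairs both sides work with
  set pairs : List (String × Int) :=
    l.map (fun kv => (kv.1, (PySem.List.pyGet? kv.2 (-1)).getD 0)) with hpairs
  -- A's rewritten dict xc2 has exactly B's pairs as items
  have hxc2 : ((l.map (fun x => x.1)).foldl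
      (fun acc x => acc.insert x
        ((PySem.List.pyGet? ((PySem.Dict.mk l).getD x []) (-1)).getD 0))
      PySem.Dict.empty).items = pairs := by
    rw [PySem.Dict.items_foldl_insert_fresh (l.map (fun x => x.1)) (fun x => x)
      (fun x => (PySem.List.pyGet? ((PySem.Dict.mk l).getD x []) (-1)).getD 0)
      PySem.Dict.empty (fun a _ => PySem.Dict.contains_empty a) (by simpa using hnd)]
    simp only [PySem.Dict.empty, List.nil_append, List.map_map, hpairs]
    apply List.map_congr_left
    intro p hp
    have hget : (PySem.Dict.mk l).getD p.1 [] = p.2 :=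
      PySem.Dict.getD_of_mem_items (PySem.Dict.mk l) (by simpa using hp)
        (by simpa [PySem.Dict.keys] using hnd) []
    simp [hget]
  -- the sorted pairs and their key list
  set sp : List (String × Int) := PySem.List.sorted pairs (fun p => p.2) true with hsp
  have hperm : sp.Perm pairs := PySem.List.sorted_perm _ _ _
  have hndsp : (sp.map (fun x => x.1)).Nodup := by
    refine ((hperm.map (fun x => x.1)).nodup_iff).mpr ?_
    simpa [hpairs, List.map_map] using hnd
  -- dict(sorted(...)) has the sorted list itself as items
  have hsort : (sp.foldl (fun d p => d.insert p.1 p.2) PySem.Dict.empty).items = sp := by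
    rw [PySem.Dict.items_foldl_insert_fresh sp (fun p => p.1) (fun p => p.2)
      PySem.Dict.empty (fun a _ => PySem.Dict.contains_empty a.1) hndsp]
    simp [PySem.Dict.empty]
  have hlen : sp.length = pairs.length := hperm.length_eq
  have hndtop : ((sp.take (pairs.length / 2)).map (fun x => x.1)).Nodup := by
    rw [List.map_take]; exact hndsp.sublist (List.take_sublist _ _)
  -- wins: inserting None for each (distinct) tophalf key appends in order
  have hwins : ((((sp.take (pairs.length / 2)).map (fun x => x.1))).foldl
      (fun d k => d.insert k (none : Option Int)) PySem.Dict.empty).items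
        = ((sp.take (pairs.length / 2)).map (fun x => x.1)).map
            (fun s => (s, (none : Option Int))) := by
    rw [PySem.Dict.items_foldl_insert_fresh _ (fun x => x) (fun _ => none)
      PySem.Dict.empty (fun a _ => PySem.Dict.contains_empty a) (by simpa using hndtop)]
    simp [PySem.Dict.empty]
  have hded : PySem.List.dedup ((sp.take (pairs.length / 2)).map (fun x => x.1))
      = (sp.take (pairs.length / 2)).map (fun x => x.1) := by
    rw [PySem.List.dedup_eq_ofList, PySem.Set.ofList_eq_self_of_nodup _ hndtop]
  simp only [PySem.Dict.keys, hxc2, ← hsp, hsort, List.length_map, hlen,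
    ← List.map_take, hwins, hded]

-- ===== VERDICT (by name: the statement is the Claim_ definition above) =====
theorem top_half_spec : Claim_equal_top_half := by
  intro l _ hpre
  exact top_half_main l hpre
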